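-- pv_equiv track=rewrite | github.com/MCarla23/Python2023 | Lab2/ex9.py | spectators
-- ===== SOURCE A (Python) =====
-- def spectators(stadion):
--     nv = []
--     l = len(stadion)
--     c = len(stadion[0])
--     maxis = []
--     for j in range(0, c):
--         maxis.append(0)
--         for i in range(0, l):
--             if stadion[i][j] <= maxis[j]:
--                 nv.append((i,j))
--             else:
--                 maxis[j] = stadion[i][j]
--     return nv
-- ===== SOURCE B (Python) =====
-- def spectators(stadion):
--     c = len(stadion[0])
--     res = []
--     for j in range(c):
--         # first pass: prefix-maximum table pm, pm[i] = max(0, column values above row i)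
--         pm = []
--         m = 0
--         for row in stadion:
--             pm.append(m)
--             if row[j] > m:
--                 m = row[j]
--         # second pass: collect blocked seats against the threshold table
--         for i in range(len(stadion)):
--             if stadion[i][j] <= pm[i]:
--                 res.append((i, j))
--     return res
-- ===== Notes on version B (the rewrite author's own statement) =====
-- stated objective: alternative
-- what changed: Per column, B first materializes a prefix-maximum threshold table in one pass and then collects blocked seats against it in a second pass, instead of A's single fused loop mutating a rolling maxis[j] cell.
import Mathlib
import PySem

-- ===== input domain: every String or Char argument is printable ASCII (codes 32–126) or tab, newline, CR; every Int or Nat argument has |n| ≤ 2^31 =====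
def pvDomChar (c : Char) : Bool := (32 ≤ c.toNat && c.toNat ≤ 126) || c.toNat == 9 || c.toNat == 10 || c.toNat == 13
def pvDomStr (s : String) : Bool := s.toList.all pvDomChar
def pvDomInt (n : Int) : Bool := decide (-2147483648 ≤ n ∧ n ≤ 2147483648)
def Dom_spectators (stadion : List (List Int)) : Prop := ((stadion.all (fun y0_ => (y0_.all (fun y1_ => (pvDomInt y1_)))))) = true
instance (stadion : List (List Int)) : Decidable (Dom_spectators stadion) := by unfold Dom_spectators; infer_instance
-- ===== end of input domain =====

-- B restructures A's fused rolling-maximum scan into, per column, a prefix-maximum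
-- threshold table built first and a separate collection pass (objective: alternative).

-- ===== PORT A =====
-- inner loop body: reads/writes the cell maxis[j] of the maxis list, appends (i,j)
def specA_inner (stadion : List (List Int)) (j : Nat)
    (st : List (Int × Int) × List Int) (i : Nat) : List (Int × Int) × List Int :=
  if (stadion.getD i []).getD j 0 ≤ st.2.getD j 0 then
    (st.1 ++ [((i : Int), (j : Int))], st.2)
  else
    (st.1, st.2.set j ((stadion.getD i []).getD j 0))

-- one outer iteration: maxis.append(0), then the inner loop over i in range(l)
def specA_step (stadion : List (List Int)) (l : Nat)
    (st : List (Int × Int) × List Int) (j : Nat) : List (Int × Int) × List Int :=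
  (List.range l).foldl (specA_inner stadion j) (st.1, st.2 ++ [0])

def spectators (stadion : List (List Int)) : List (Int × Int) :=
  ((List.range (stadion.headD []).length).foldl
    (specA_step stadion stadion.length) ([], [])).1

-- ===== PORT B =====
-- first pass of a column: the prefix-maximum table pm (pm[i] = max(0, rows above i))
def specB_pm (stadion : List (List Int)) (j : Nat) : List Int :=
  (stadion.foldl
    (fun (st : List Int × Int) row =>
      (st.1 ++ [st.2], if row.getD j 0 > st.2 then row.getD j 0 else st.2))
    ([], 0)).1

-- second pass of a column: collect (i,j) whenever stadion[i][j] <= pm[i]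
def specB_col (stadion : List (List Int)) (j : Nat)
    (res : List (Int × Int)) : List (Int × Int) :=
  let pm := specB_pm stadion j
  (List.range stadion.length).foldl
    (fun res i =>
      if (stadion.getD i []).getD j 0 ≤ pm.getD i 0 then
        res ++ [((i : Int), (j : Int))]
      else res)
    res

def spectators_alt (stadion : List (List Int)) : List (Int × Int) :=
  (List.range (stadion.headD []).length).foldl
    (fun res j => specB_col stadion j res) []

-- ===== PRECONDITION & SPEC =====
-- Pre_ excludes exactly the inputs on which the Python A raises IndexError:
-- an empty stadion (stadion[0]) and ragged grids with a row shorter than row 0.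
def Pre_spectators (stadion : List (List Int)) : Prop :=
  stadion ≠ [] ∧ ∀ r ∈ stadion, (stadion.headD []).length ≤ r.length
instance (stadion : List (List Int)) : Decidable (Pre_spectators stadion) := by
  unfold Pre_spectators; infer_instance
def pvWitness_spectators : List (List Int) := [[1, 2], [0, 3]]

def Spec_spectators (stadion : List (List Int)) (out : List (Int × Int)) : Prop := out = spectators_alt stadion
instance (stadion : List (List Int)) (out : List (Int × Int)) : Decidable (Spec_spectators stadion out) := by unfold Spec_spectators; infer_instance

-- ===== CLAIM (what is proved, stated in full; the proofs are below) =====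
def Claim_equal_spectators : Prop := ∀ (stadion : List (List Int)), Dom_spectators stadion → Pre_spectators stadion → Spec_spectators stadion (spectators stadion)

-- ===== LEMMAS AND PROOFS =====

-- value of seat (i, j), with Python's in-range guarantees expressed by getD
def rowv (stadion : List (List Int)) (j i : Nat) : Int :=
  (stadion.getD i []).getD j 0

-- reference column scan: rolling maximum m, collected seats + final maximum
def colA (stadion : List (List Int)) (j : Nat) : Nat → Nat → Int → List (Int × Int) × Int
  | _, 0, m => ([], m)
  | a, n+1, m =>
    if rowv stadion j a ≤ m then
      let r := colA stadion j (a+1) n m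
      (((a : Int), (j : Int)) :: r.1, r.2)
    else colA stadion j (a+1) n (rowv stadion j a)

-- concatenation of the reference scans of columns j, j+1, …, j+n-1
def colsA (stadion : List (List Int)) (l : Nat) : Nat → Nat → List (Int × Int)
  | _, 0 => []
  | j, n+1 => (colA stadion j 0 l 0).1 ++ colsA stadion l (j+1) n

-- rolling maximum of column j over rows a, …, a+i-1 starting from m
def rollG (stadion : List (List Int)) (j : Nat) : Nat → Nat → Int → Int
  | _, 0, m => m
  | a, i+1, m => rollG stadion j (a+1) i (if rowv stadion j a > m then rowv stadion j a else m)

-- structural prefix-maximum list (mirror of B's first pass)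
def pmsF (j : Nat) : List (List Int) → Int → List Int
  | [], _ => []
  | r :: rs, m => m :: pmsF j rs (if r.getD j 0 > m then r.getD j 0 else m)

lemma getD_concat (pre : List Int) (m : Int) : (pre ++ [m]).getD pre.length 0 = m := by
  induction pre with
  | nil => rfl
  | cons x xs ih => simpa using ih

lemma set_concat (pre : List Int) (m v : Int) :
    (pre ++ [m]).set pre.length v = pre ++ [v] := by
  induction pre with
  | nil => rfl
  | cons x xs ih => simpa using ih

lemma innerA (stadion : List (List Int)) :
    ∀ (n a : Nat) (acc : List (Int × Int)) (pre : List Int) (m : Int),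
    (List.range' a n).foldl (specA_inner stadion pre.length) (acc, pre ++ [m])
    = (acc ++ (colA stadion pre.length a n m).1,
       pre ++ [(colA stadion pre.length a n m).2]) := by
  intro n
  induction n with
  | zero => intro a acc pre m; simp [colA]
  | succ n ih =>
    intro a acc pre m
    rw [List.range'_succ]
    simp only [List.foldl_cons, specA_inner, getD_concat, set_concat, colA, rowv]
    split_ifs with h
    · rw [ih]; simp
    · rw [ih]

lemma outerA (stadion : List (List Int)) (l : Nat) :
    ∀ (n j : Nat) (acc : List (Int × Int)) (pre : List Int), pre.length = j →
    ((List.range' j n).foldl (specA_step stadion l) (acc, pre)).1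
    = acc ++ colsA stadion l j n := by
  intro n
  induction n with
  | zero => intro j acc pre _; simp [colsA]
  | succ n ih =>
    intro j acc pre hlen
    rw [List.range'_succ]
    simp only [List.foldl_cons, specA_step]
    rw [List.range_eq_range', ← hlen, innerA stadion l 0 acc pre 0]
    have : (pre ++ [(colA stadion pre.length 0 l 0).2]).length = pre.length + 1 := by simp
    rw [ih (pre.length + 1) _ _ this]
    simp [colsA, hlen]

lemma spectators_eq_colsA (stadion : List (List Int)) :
    spectators stadion
    = colsA stadion stadion.length 0 (stadion.headD []).length := by
  unfold spectators
  rw [List.range_eq_range', outerA stadion stadion.length _ 0 [] [] rfl]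
  simp

lemma pmFold (j : Nat) :
    ∀ (rows : List (List Int)) (acc : List Int) (m : Int),
    (rows.foldl
      (fun (st : List Int × Int) row =>
        (st.1 ++ [st.2], if row.getD j 0 > st.2 then row.getD j 0 else st.2))
      (acc, m)).1 = acc ++ pmsF j rows m := by
  intro rows
  induction rows with
  | nil => intro acc m; simp [pmsF]
  | cons r rs ih =>
    intro acc m
    simp only [List.foldl_cons]
    rw [ih]
    simp [pmsF]

lemma specB_pm_eq (stadion : List (List Int)) (j : Nat) :
    specB_pm stadion j = pmsF j stadion 0 := by
  unfold specB_pm; rw [pmFold]; simp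

lemma pms_getD (stadion : List (List Int)) (j : Nat) :
    ∀ (i b : Nat) (rows : List (List Int)) (m : Int),
    rows = stadion.drop b → i < rows.length →
    (pmsF j rows m).getD i 0 = rollG stadion j b i m := by
  intro i
  induction i with
  | zero =>
    intro b rows m hrows hi
    cases rows with
    | nil => simp at hi
    | cons r rs => simp [pmsF, rollG]
  | succ i ih =>
    intro b rows m hrows hi
    cases rows with
    | nil => simp at hi
    | cons r rs =>
      have hb : b < stadion.length := by
        by_contra h
        rw [List.drop_eq_nil_of_le (Nat.le_of_not_lt h)] at hrows
        simp at hrows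
      have hget : stadion[b]'hb = r := by
        have h0 : (stadion.drop b)[0]? = some r := by rw [← hrows]; rfl
        rw [List.getElem?_drop, Nat.add_zero] at h0
        rw [List.getElem?_eq_getElem hb, Option.some_inj] at h0
        exact h0
      have hrs : rs = stadion.drop (b + 1) := by
        have := congrArg List.tail hrows
        simpa [List.tail_drop] using this
      have hrv : rowv stadion j b = r.getD j 0 := by
        simp [rowv, List.getD, hget, List.getD_eq_getElem?_getD,
              List.getElem?_eq_getElem hb, hget]
      simp only [pmsF, List.getD_cons_succ, rollG, hrv]
      exact ih (b + 1) rs _ hrs (by simpa using hi)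

lemma rollG_snoc (stadion : List (List Int)) (j : Nat) :
    ∀ (i b : Nat) (m : Int),
    rollG stadion j b (i + 1) m
    = (if rowv stadion j (b + i) > rollG stadion j b i m then rowv stadion j (b + i)
       else rollG stadion j b i m) := by
  intro i
  induction i with
  | zero => intro b m; simp [rollG]
  | succ i ih =>
    intro b m
    show rollG stadion j (b+1) (i+1) _ = _
    rw [ih]
    have hbi : b + 1 + i = b + (i + 1) := by omega
    rw [hbi]
    simp only [rollG]

lemma innerB (stadion : List (List Int)) (j : Nat) :
    ∀ (n a : Nat) (res : List (Int × Int)), a + n ≤ stadion.length →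
    (List.range' a n).foldl
      (fun res i =>
        if (stadion.getD i []).getD j 0 ≤ (specB_pm stadion j).getD i 0 then
          res ++ [((i : Int), (j : Int))]
        else res)
      res
    = res ++ (colA stadion j a n (rollG stadion j 0 a 0)).1 := by
  intro n
  induction n with
  | zero => intro a res _; simp [colA]
  | succ n ih =>
    intro a res hle
    have ha : a < stadion.length := by omega
    have hpm : (specB_pm stadion j).getD a 0 = rollG stadion j 0 a 0 := by
      rw [specB_pm_eq]
      exact pms_getD stadion j a 0 stadion 0 (by simp) ha
    have hnext : rollG stadion j 0 (a + 1) 0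
        = (if rowv stadion j a > rollG stadion j 0 a 0 then rowv stadion j a
           else rollG stadion j 0 a 0) := by
      simpa using rollG_snoc stadion j a 0 0
    rw [List.range'_succ]
    simp only [List.foldl_cons, hpm]
    by_cases h : rowv stadion j a ≤ rollG stadion j 0 a 0
    · have hm : rollG stadion j 0 (a + 1) 0 = rollG stadion j 0 a 0 := by
        rw [hnext, if_neg (by omega)]
      rw [if_pos (by simpa [rowv] using h), ih (a + 1) _ (by omega), hm]
      simp [colA, h]
    · have hm : rollG stadion j 0 (a + 1) 0 = rowv stadion j a := by
        rw [hnext, if_pos (by omega)]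
      rw [if_neg (by simpa [rowv] using h), ih (a + 1) _ (by omega), hm]
      simp [colA, h]

lemma outerB (stadion : List (List Int)) :
    ∀ (n j0 : Nat) (res : List (Int × Int)),
    (List.range' j0 n).foldl (fun res j => specB_col stadion j res) res
    = res ++ colsA stadion stadion.length j0 n := by
  intro n
  induction n with
  | zero => intro j0 res; simp [colsA]
  | succ n ih =>
    intro j0 res
    rw [List.range'_succ]
    simp only [List.foldl_cons]
    rw [ih]
    have hcol : specB_col stadion j0 res
        = res ++ (colA stadion j0 0 stadion.length (rollG stadion j0 0 0 0)).1 := by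
      simp only [specB_col]
      rw [List.range_eq_range']
      exact innerB stadion j0 stadion.length 0 res (by omega)
    rw [hcol]
    simp [colsA, rollG]

lemma spectators_alt_eq_colsA (stadion : List (List Int)) :
    spectators_alt stadion
    = colsA stadion stadion.length 0 (stadion.headD []).length := by
  unfold spectators_alt
  rw [List.range_eq_range', outerB]
  simp

-- ===== VERDICT (by name: the statement is the Claim_ definition above) =====
theorem spectators_spec : Claim_equal_spectators := by
  intro stadion _ _
  unfold Spec_spectators
  rw [spectators_eq_colsA, spectators_alt_eq_colsA]
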